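-- pv_equiv track=rewrite | github.com/Kawser-nerd/CLCDSA | Source Codes/AtCoder/arc005/B/3513451.py | b_card
-- ===== SOURCE A (Python) =====
-- def b_card(X, Y, W, C):
--     h, w = Y - 1, X - 1
--     if 'R' in W:
--         dw = 1
--     elif 'L' in W:
--         dw = -1
--     else:
--         dw = 0
--
--     if 'U' in W:
--         dh = -1
--     elif 'D' in W:
--         dh = 1
--     else:
--         dh = 0
--
--     ans = ''
--     for k in range(4):
--         ans += C[h][w]
--
--         is_changed = False
--         nh, nw = h + dh, w + dw
--         move_tmp = ''
--         if not (0 <= nh < 9):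
--             is_changed = True
--             dh *= -1
--         if not (0 <= nw < 9):
--             is_changed = True
--             dw *= -1
--         if is_changed:
--             nh, nw = h + dh, w + dw
--         h, w = nh, nw
--     return ans
-- ===== SOURCE B (Python) =====
-- def b_card(X, Y, W, C):
--     dw = 1 if 'R' in W else (-1 if 'L' in W else 0)
--     dh = -1 if 'U' in W else (1 if 'D' in W else 0)
--
--     def walk(p, d):
--         out = []
--         for _ in range(4):
--             out.append(p)
--             if 0 <= p + d < 9:
--                 p += d
--             else:
--                 p, d = p - d, -d
--         return out
--
--     return ''.join(C[h][w] for h, w in zip(walk(Y - 1, dh), walk(X - 1, dw)))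
-- ===== Notes on version B (the rewrite author's own statement) =====
-- stated objective: simpler
-- what changed: Replaces A's single coupled state machine (mutating h,w,dh,dw with an is_changed flag and recompute rule) by two independent one-dimensional bounce walks, exploiting that the axes never interact; the four cells are then collected with zip and one join.
import Mathlib
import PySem

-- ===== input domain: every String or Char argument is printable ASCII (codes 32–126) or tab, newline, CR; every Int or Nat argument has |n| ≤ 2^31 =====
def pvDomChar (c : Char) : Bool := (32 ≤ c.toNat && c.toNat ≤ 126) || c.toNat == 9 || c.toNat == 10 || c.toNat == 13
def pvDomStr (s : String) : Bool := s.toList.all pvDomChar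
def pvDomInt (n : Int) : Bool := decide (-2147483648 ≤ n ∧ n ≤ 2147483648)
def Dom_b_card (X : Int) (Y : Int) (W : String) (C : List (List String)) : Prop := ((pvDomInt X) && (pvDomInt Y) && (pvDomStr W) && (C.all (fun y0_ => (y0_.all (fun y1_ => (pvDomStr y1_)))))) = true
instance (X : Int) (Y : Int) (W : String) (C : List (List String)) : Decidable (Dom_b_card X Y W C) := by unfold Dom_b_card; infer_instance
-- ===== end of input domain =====

-- B replaces A's coupled 5-variable bounce state machine by two independent per-axis
-- walks combined with zip and one join (simpler decomposition, same cost).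

-- ===== PORT A =====
-- the loop body of A, line for line (state = (h, w, dh, dw, ans))
def b_cardBody (C : List (List String)) (st : Int × Int × Int × Int × String) (_k : Int) :
    Int × Int × Int × Int × String :=
  let h := st.1; let w := st.2.1; let dh := st.2.2.1; let dw := st.2.2.2.1; let ans := st.2.2.2.2
  let ans := ans ++ PySem.List.pyGetD (PySem.List.pyGetD C h []) w ""
  let isChanged := false
  let nh := h + dh
  let nw := w + dw
  let p1 : Bool × Int := if ¬ (0 ≤ nh ∧ nh < 9) then (true, dh * (-1)) else (isChanged, dh)
  let isChanged := p1.1; let dh := p1.2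
  let p2 : Bool × Int := if ¬ (0 ≤ nw ∧ nw < 9) then (true, dw * (-1)) else (isChanged, dw)
  let isChanged := p2.1; let dw := p2.2
  let pn : Int × Int := if isChanged then (h + dh, w + dw) else (nh, nw)
  (pn.1, pn.2, dh, dw, ans)

def b_card (X : Int) (Y : Int) (W : String) (C : List (List String)) : String :=
  let h := Y - 1
  let w := X - 1
  let dw : Int := if PySem.Str.isIn "R" W then 1 else if PySem.Str.isIn "L" W then -1 else 0
  let dh : Int := if PySem.Str.isIn "U" W then -1 else if PySem.Str.isIn "D" W then 1 else 0
  let st := (PySem.List.pyRange 0 4 1).foldl (b_cardBody C) (h, w, dh, dw, "")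
  st.2.2.2.2

-- ===== PORT B =====
-- B's per-axis walk: the four positions visited along one axis
def pvWalk (p : Int) (d : Int) : List Int :=
  ((PySem.List.pyRange 0 4 1).foldl (fun (st : List Int × Int × Int) _ =>
      (st.1 ++ [st.2.1],
       if 0 ≤ st.2.1 + st.2.2 ∧ st.2.1 + st.2.2 < 9
       then (st.2.1 + st.2.2, st.2.2)
       else (st.2.1 - st.2.2, -st.2.2)))
    ([], p, d)).1

def b_card_alt (X : Int) (Y : Int) (W : String) (C : List (List String)) : String :=
  let dw : Int := if PySem.Str.isIn "R" W then 1 else if PySem.Str.isIn "L" W then -1 else 0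
  let dh : Int := if PySem.Str.isIn "U" W then -1 else if PySem.Str.isIn "D" W then 1 else 0
  PySem.Str.join "" ((List.zip (pvWalk (Y - 1) dh) (pvWalk (X - 1) dw)).map
    (fun pr => PySem.List.pyGetD (PySem.List.pyGetD C pr.1 []) pr.2 ""))

-- ===== PRECONDITION & SPEC =====
-- spec-side helpers for Pre_ (closed form; three unfolded bounce steps, no loop)
def pvStepA (h d : Int) : Int × Int :=
  if 0 ≤ h + d ∧ h + d < 9 then (h + d, d) else (h - d, -d)

def pvPos (p d : Int) : List Int :=
  let s1 := pvStepA p d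
  let s2 := pvStepA s1.1 s1.2
  let s3 := pvStepA s2.1 s2.2
  [p, s1.1, s2.1, s3.1]

def pvDW (W : String) : Int := if PySem.Str.isIn "R" W then 1 else if PySem.Str.isIn "L" W then -1 else 0
def pvDH (W : String) : Int := if PySem.Str.isIn "U" W then -1 else if PySem.Str.isIn "D" W then 1 else 0

def pvValidIdx (n : Nat) (i : Int) : Prop := -(n : Int) ≤ i ∧ i < (n : Int)

-- Pre_ = exactly the inputs on which A returns: all eight element accesses
-- C[h_k][w_k] of the four-step walk are valid Python indices (A raises IndexError otherwise).
def Pre_b_card (X : Int) (Y : Int) (W : String) (C : List (List String)) : Prop :=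
  ∀ pr ∈ List.zip (pvPos (Y - 1) (pvDH W)) (pvPos (X - 1) (pvDW W)),
    pvValidIdx C.length pr.1 ∧ pvValidIdx (PySem.List.pyGetD C pr.1 []).length pr.2
instance (X : Int) (Y : Int) (W : String) (C : List (List String)) : Decidable (Pre_b_card X Y W C) := by unfold Pre_b_card pvValidIdx; infer_instance

def pvWitness_b_card : Int × Int × String × List (List String) :=
  (2, 3, "RD",
   [["00","01","02","03","04","05","06","07","08"],
    ["10","11","12","13","14","15","16","17","18"],
    ["20","21","22","23","24","25","26","27","28"],
    ["30","31","32","33","34","35","36","37","38"],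
    ["40","41","42","43","44","45","46","47","48"],
    ["50","51","52","53","54","55","56","57","58"],
    ["60","61","62","63","64","65","66","67","68"],
    ["70","71","72","73","74","75","76","77","78"],
    ["80","81","82","83","84","85","86","87","88"]])

def Spec_b_card (X : Int) (Y : Int) (W : String) (C : List (List String)) (out : String) : Prop := out = b_card_alt X Y W C
instance (X : Int) (Y : Int) (W : String) (C : List (List String)) (out : String) : Decidable (Spec_b_card X Y W C out) := by unfold Spec_b_card; infer_instance

-- ===== CLAIM (what is proved, stated in full; the proofs are below) =====
def Claim_equal_b_card : Prop := ∀ (X : Int) (Y : Int) (W : String) (C : List (List String)), Dom_b_card X Y W C → Pre_b_card X Y W C → Spec_b_card X Y W C (b_card X Y W C)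

-- ===== LEMMAS AND PROOFS =====

-- A's coupled loop body acts on each axis exactly like pvStepA
theorem bodyEq (C : List (List String)) (h w dh dw : Int) (ans : String) (k : Int) :
    b_cardBody C (h, w, dh, dw, ans) k =
      ((pvStepA h dh).1, (pvStepA w dw).1, (pvStepA h dh).2, (pvStepA w dw).2,
       ans ++ PySem.List.pyGetD (PySem.List.pyGetD C h []) w "") := by
  simp only [b_cardBody, pvStepA]
  split_ifs <;> simp_all <;> omega

-- B's walk lists the four pvStepA positions
theorem walkEq (p d : Int) :
    pvWalk p d = [p, (pvStepA p d).1, (pvStepA (pvStepA p d).1 (pvStepA p d).2).1,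
      (pvStepA (pvStepA (pvStepA p d).1 (pvStepA p d).2).1
               (pvStepA (pvStepA p d).1 (pvStepA p d).2).2).1] := by
  have hr : PySem.List.pyRange 0 4 1 = [0, 1, 2, 3] := by decide
  have stepFold : ∀ a b : Int,
      (if 0 ≤ a + b ∧ a + b < 9 then (a + b, b) else (a - b, -b)) = pvStepA a b :=
    fun a b => rfl
  simp only [pvWalk, hr, List.foldl, stepFold]
  simp

-- ''.join on four pieces is the left-nested append A builds
theorem join4Eq (a b c d : String) :
    "" ++ a ++ b ++ c ++ d =
      String.ofList (PySem.Chars.join "".toList [a.toList, b.toList, c.toList, d.toList]) := by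
  have h : ("" ++ a ++ b ++ c ++ d).toList =
      PySem.Chars.join "".toList [a.toList, b.toList, c.toList, d.toList] := by
    simp [PySem.Chars.join, List.intercalate]
  calc "" ++ a ++ b ++ c ++ d = String.ofList (("" ++ a ++ b ++ c ++ d).toList) := by
        simp [String.append_assoc]
    _ = _ := by rw [h]

theorem b_card_spec : Claim_equal_b_card := by
  intro X Y W C _hDom _hPre
  unfold Spec_b_card b_card b_card_alt
  have hr : PySem.List.pyRange 0 4 1 = [0, 1, 2, 3] := by decide
  simp only [hr, List.foldl, walkEq, List.zip, List.zipWith, List.map, bodyEq, PySem.Str.join]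
  exact join4Eq _ _ _ _
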